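-- pv_equiv track=rewrite | github.com/jelly12paw/Algorithm | 프로그래머스/1/42840. 모의고사/모의고사.py | solution
-- ===== SOURCE A (Python) =====
-- def solution(answers):
--     answer = []
--
--     count1 = 0
--     count2 = 0
--     count3 = 0
--
--     ans1 = [1,2,3,4,5]
--     ans2 = [2,1,2,3,2,4,2,5]
--     ans3 = [3,3,1,1,2,2,4,4,5,5]
--
--     for idx, a in enumerate(answers):
--         if(ans1[idx%len(ans1)] == a):
--             count1 += 1
--
--     for idx, a in enumerate(answers):
--         if(ans2[idx%len(ans2)] == a):
--             count2 += 1
--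
--     for idx, a in enumerate(answers):
--         if(ans3[idx%len(ans3)] == a):
--             count3 += 1
--
--     maxcount = max([count1, count2, count3])
--
--     if(count1 == maxcount):
--         answer.append(1)
--     if(count2 == maxcount):
--         answer.append(2)
--     if(count3 == maxcount):
--         answer.append(3)
--
--     answer.sort()
--     return answer
-- ===== SOURCE B (Python) =====
-- def solution(answers):
--     # Histogram of (index mod 40, answer) pairs (40 = lcm of the pattern periods),
--     # then each pattern's score is read off the 40-entry histogram.
--     hist = {}
--     for i, a in enumerate(answers):
--         key = (i % 40, a)
--         hist[key] = hist.get(key, 0) + 1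
--     patterns = [[1, 2, 3, 4, 5],
--                 [2, 1, 2, 3, 2, 4, 2, 5],
--                 [3, 3, 1, 1, 2, 2, 4, 4, 5, 5]]
--     scores = [sum(hist.get((j, p[j % len(p)]), 0) for j in range(40))
--               for p in patterns]
--     best = max(scores)
--     return [i + 1 for i in range(3) if scores[i] == best]
-- ===== Notes on version B (the rewrite author's own statement) =====
-- stated objective: alternative
-- what changed: Instead of scanning answers once per pattern, B builds a histogram of (index mod 40, answer) pairs in a single pass (40 = lcm of the three pattern periods) and then computes each pattern's score purely from the 40-entry histogram, without touching answers again; the result is emitted already sorted by a range comprehension instead of append-then-sort.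
import Mathlib
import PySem

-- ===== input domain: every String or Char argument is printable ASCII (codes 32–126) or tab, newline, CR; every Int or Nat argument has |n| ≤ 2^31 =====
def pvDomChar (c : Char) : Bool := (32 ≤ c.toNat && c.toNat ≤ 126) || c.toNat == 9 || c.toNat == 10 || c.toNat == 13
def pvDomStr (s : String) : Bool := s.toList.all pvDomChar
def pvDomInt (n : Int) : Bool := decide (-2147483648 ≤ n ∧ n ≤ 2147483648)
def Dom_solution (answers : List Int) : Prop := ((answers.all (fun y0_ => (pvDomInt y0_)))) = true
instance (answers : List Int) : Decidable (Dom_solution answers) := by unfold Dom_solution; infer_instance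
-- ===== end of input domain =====

-- B replaces A's three scans of answers by one pass building a histogram of
-- (index mod 40, answer) pairs (40 = lcm of the pattern periods) and scores each
-- pattern from the 40-entry table (objective: alternative algorithm).

-- ===== PORT A =====
def solution (answers : List Int) : List Int :=
  let ans1 : List Int := [1,2,3,4,5]
  let ans2 : List Int := [2,1,2,3,2,4,2,5]
  let ans3 : List Int := [3,3,1,1,2,2,4,4,5,5]
  let count1 : Int := (PySem.List.enumerate answers 0).foldl
    (fun c p => if PySem.List.pyGetD ans1 (PySem.Int.mod p.1 (ans1.length : Int)) 0 == p.2 then c + 1 else c) 0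
  let count2 : Int := (PySem.List.enumerate answers 0).foldl
    (fun c p => if PySem.List.pyGetD ans2 (PySem.Int.mod p.1 (ans2.length : Int)) 0 == p.2 then c + 1 else c) 0
  let count3 : Int := (PySem.List.enumerate answers 0).foldl
    (fun c p => if PySem.List.pyGetD ans3 (PySem.Int.mod p.1 (ans3.length : Int)) 0 == p.2 then c + 1 else c) 0
  let maxcount : Int := (PySem.List.max? [count1, count2, count3] (fun x => x)).getD 0
  let answer : List Int :=
    ((if count1 == maxcount then [(1 : Int)] else []) ++
     (if count2 == maxcount then [(2 : Int)] else [])) ++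
     (if count3 == maxcount then [(3 : Int)] else [])
  PySem.List.sorted answer (fun x => x) false

-- ===== PORT B =====
def solution_alt (answers : List Int) : List Int :=
  let hist : PySem.Dict (Int × Int) Int :=
    (PySem.List.enumerate answers 0).foldl
      (fun d p => d.insert (PySem.Int.mod p.1 40, p.2) (d.getD (PySem.Int.mod p.1 40, p.2) 0 + 1))
      PySem.Dict.empty
  let patterns : List (List Int) := [[1,2,3,4,5],[2,1,2,3,2,4,2,5],[3,3,1,1,2,2,4,4,5,5]]
  let scores : List Int := patterns.map (fun p =>
    ((PySem.List.pyRange 0 40 1).map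
      (fun j => hist.getD (j, PySem.List.pyGetD p (PySem.Int.mod j (p.length : Int)) 0) 0)).sum)
  let best : Int := (PySem.List.max? scores (fun x => x)).getD 0
  (PySem.List.pyRange 0 3 1).foldl
    (fun acc i => if PySem.List.pyGetD scores i 0 == best then acc ++ [i + 1] else acc) []

-- ===== PRECONDITION & SPEC =====
def Spec_solution (answers : List Int) (out : List Int) : Prop := out = solution_alt answers
instance (answers : List Int) (out : List Int) : Decidable (Spec_solution answers out) := by unfold Spec_solution; infer_instance

-- ===== CLAIM (what is proved, stated in full; the proofs are below) =====
def Claim_equal_solution : Prop := ∀ (answers : List Int), Dom_solution answers → Spec_solution answers (solution answers)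

-- ===== LEMMAS AND PROOFS =====

-- A 0/1-indicator summed over a duplicate-free list containing m contributes exactly m's term.
theorem sum_indicator (g : Int → Int) (m a : Int) :
    ∀ (l : List Int), l.Nodup → m ∈ l →
      (l.map (fun j => if (m, a) = (j, g j) then (1 : Int) else 0)).sum
        = if g m = a then 1 else 0 := by
  intro l
  induction l with
  | nil => simp
  | cons x t ih =>
    intro hnd hm
    simp only [List.map_cons, List.sum_cons]
    rcases List.mem_cons.1 hm with h | h
    · subst h
      have ht : m ∉ t := (List.nodup_cons.1 hnd).1
      have hz : (t.map (fun j => if (m, a) = (j, g j) then (1 : Int) else 0)).sum = 0 := by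
        apply List.sum_eq_zero
        intro y hy
        rcases List.mem_map.1 hy with ⟨j, hj, rfl⟩
        have : m ≠ j := fun e => ht (e ▸ hj)
        simp [Prod.ext_iff, this]
      rw [hz]
      simp [Prod.ext_iff, eq_comm]
    · have hx : m ≠ x := fun e => (List.nodup_cons.1 hnd).1 (e ▸ h)
      rw [ih (List.nodup_cons.1 hnd).2 h]
      simp [Prod.ext_iff, hx]

-- For a pattern whose period divides 40, summing the histogram of
-- (index mod 40, answer) keys over the 40 buckets is the direct match count.
theorem count_via_hist (p : List Int) (hdvd : (p.length : Int) ∣ 40) (hpos : 0 < (p.length : Int))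
    (answers : List Int) : ∀ (s : Nat),
    ((PySem.List.pyRange 0 40 1).map
      (fun j => (((PySem.List.enumerate answers (s : Int)).map
          (fun q => (PySem.Int.mod q.1 40, q.2))).count
            (j, PySem.List.pyGetD p (PySem.Int.mod j (p.length : Int)) 0) : Int))).sum
    = ((PySem.List.enumerate answers (s : Int)).countP
        (fun q => PySem.List.pyGetD p (PySem.Int.mod q.1 (p.length : Int)) 0 == q.2) : Int) := by
  induction answers with
  | nil => intro s; simp [PySem.List.enumerate_nil]
  | cons a t ih =>
    intro s
    rw [PySem.List.enumerate_cons]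
    simp only [List.map_cons, List.count_cons, List.countP_cons]
    push_cast
    rw [PySem.List.sum_map_add_int]
    have hs1 : (s : Int) + 1 = ((s + 1 : Nat) : Int) := by push_cast; ring
    rw [hs1, ih (s + 1)]
    congr 1
    -- remaining: the indicator sum equals the head's match indicator
    set m : Int := PySem.Int.mod (s : Int) 40 with hm
    have h40 : (0:Int) < 40 := by norm_num
    have hm0 : 0 ≤ m := PySem.Int.mod_nonneg _ h40
    have hm40 : m < 40 := PySem.Int.mod_lt _ h40
    have hmem : m ∈ PySem.List.pyRange 0 40 1 := by
      rw [PySem.List.mem_pyRange_one]; exact ⟨hm0, hm40⟩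
    have hkey : PySem.Int.mod m (p.length : Int) = PySem.Int.mod (s : Int) (p.length : Int) := by
      rw [PySem.Int.mod_eq_emod_of_pos hpos, PySem.Int.mod_eq_emod_of_pos hpos,
          hm, PySem.Int.mod_eq_emod_of_pos h40]
      exact Int.emod_emod_of_dvd _ hdvd
    have := sum_indicator (fun j => PySem.List.pyGetD p (PySem.Int.mod j (p.length : Int)) 0)
      m a (PySem.List.pyRange 0 40 1) (PySem.List.nodup_pyRange_one 0 40) hmem
    simp only [beq_iff_eq]
    simpa [hkey] using this

-- A lookup in B's histogram dict is a count over the mapped key list.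
theorem hist_getD (l : List (Int × Int)) (k : Int × Int) :
    (l.foldl (fun d p => d.insert (PySem.Int.mod p.1 40, p.2)
        (d.getD (PySem.Int.mod p.1 40, p.2) 0 + 1)) PySem.Dict.empty).getD k 0
    = ((l.map (fun q => (PySem.Int.mod q.1 40, q.2))).count k : Int) := by
  have h := PySem.Dict.getD_foldl_insert_add_one
    (l := l.map (fun q => (PySem.Int.mod q.1 40, q.2))) (d := PySem.Dict.empty) (v := k)
  rw [List.foldl_map] at h
  simpa using h

theorem solution_eq_alt (answers : List Int) : solution answers = solution_alt answers := by
  simp only [solution, solution_alt]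
  simp only [hist_getD, List.map_cons, List.map_nil, List.length_cons, List.length_nil]
  have h1 := count_via_hist [1,2,3,4,5] (by norm_num) (by norm_num) answers 0
  have h2 := count_via_hist [2,1,2,3,2,4,2,5] (by norm_num) (by norm_num) answers 0
  have h3 := count_via_hist [3,3,1,1,2,2,4,4,5,5] (by norm_num) (by norm_num) answers 0
  simp only [Nat.cast_zero, List.length_cons, List.length_nil] at h1 h2 h3
  rw [h1, h2, h3]
  simp only [PySem.List.foldl_if_add_one, zero_add]
  rw [show PySem.List.pyRange 0 3 1 = [0,1,2] from rfl]
  simp only [List.foldl_cons, List.foldl_nil]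
  norm_num [PySem.List.pyGetD_ofNat']
  split_ifs <;> rfl

-- ===== VERDICT (by name: the statement is the Claim_ definition above) =====
theorem solution_spec : Claim_equal_solution := by
  intro answers _
  exact solution_eq_alt answers
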